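-- pv_equiv track=rewrite | github.com/simonvoelk/pp3 | db_abfrage.py | _build_prefix3_zkp_mapping
-- ===== SOURCE A (Python) =====
-- def _normalize_sys_id(raw_value: object) -> str:
--     """Normalisiert SYS_ID-Werte fuer robuste Vergleiche."""
--     return str(raw_value).strip() if raw_value is not None else ""
--
-- def _sys_id_prefix3(sys_id: str) -> str:
--     """Liefert den SYS_ID-Praefix aus den ersten 3 Gruppen."""
--     value = _normalize_sys_id(sys_id)
--     if not value:
--         return ""
--     parts = value.split(".")
--     if len(parts) < 3:
--         return ""
--     return ".".join(parts[:3])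
--
-- def _build_prefix3_zkp_mapping(mapping: dict[str, str]) -> dict[str, str]:
--     """Erzeugt konfliktfreie ZKP-Zuordnung ueber SYS_ID-Praefix (erste 3 Gruppen)."""
--     prefix_map: dict[str, str] = {}
--     conflicts: set[str] = set()
--
--     for sys_id, zkp in mapping.items():
--         prefix = _sys_id_prefix3(sys_id)
--         if not prefix:
--             continue
--         existing = prefix_map.get(prefix)
--         if existing is None:
--             prefix_map[prefix] = zkp
--             continue
--         if existing != zkp:
--             conflicts.add(prefix)
--
--     for prefix in conflicts:
--         prefix_map.pop(prefix, None)
--     return prefix_map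
-- ===== SOURCE B (Python) =====
-- def _sys_id_prefix3(sys_id: str) -> str:
--     value = str(sys_id).strip() if sys_id is not None else ""
--     if not value:
--         return ""
--     parts = value.split(".")
--     if len(parts) < 3:
--         return ""
--     return ".".join(parts[:3])
--
-- def _build_prefix3_zkp_mapping(mapping: dict) -> dict:
--     """Declarative nested-scan: a prefix is kept iff every occurrence carries the same ZKP."""
--     pairs = [(_sys_id_prefix3(sys_id), zkp) for sys_id, zkp in mapping.items()]
--     result = {}
--     for prefix, zkp in pairs:
--         if not prefix or prefix in result:
--             continue
--         if all(z == zkp for p, z in pairs if p == prefix):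
--             result[prefix] = zkp
--     return result
-- ===== Notes on version B (the rewrite author's own statement) =====
-- stated objective: alternative
-- what changed: Instead of a single stateful pass maintaining a first-value map plus a conflict set and deleting conflicts afterwards, B precomputes the (prefix, zkp) pairs and decides each prefix declaratively at its first occurrence by a nested scan checking that every occurrence of that prefix carries the same zkp; it trades A's O(n) bookkeeping for an O(n^2) stateless check.
import Mathlib
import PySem

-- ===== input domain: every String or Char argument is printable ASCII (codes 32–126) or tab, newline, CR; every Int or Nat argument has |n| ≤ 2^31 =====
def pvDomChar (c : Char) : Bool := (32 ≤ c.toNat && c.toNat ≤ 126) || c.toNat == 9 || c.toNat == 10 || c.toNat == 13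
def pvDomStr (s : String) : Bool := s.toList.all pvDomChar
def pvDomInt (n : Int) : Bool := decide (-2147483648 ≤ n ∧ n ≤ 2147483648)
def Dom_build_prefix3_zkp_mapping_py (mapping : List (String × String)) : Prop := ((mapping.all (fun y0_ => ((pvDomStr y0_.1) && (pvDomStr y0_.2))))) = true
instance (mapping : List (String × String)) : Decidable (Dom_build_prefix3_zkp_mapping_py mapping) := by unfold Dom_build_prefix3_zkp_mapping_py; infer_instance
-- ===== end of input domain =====

-- B replaces A's stateful pass (first-value map + conflict set + deletion pass) by a stateless
-- declarative rule: precompute the (prefix, zkp) pairs and keep a prefix, at its first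
-- occurrence, iff every occurrence of that prefix carries the same zkp (return value only).

-- ===== PORT A =====
-- _normalize_sys_id: the argument is always a str here, so 'str(raw_value).strip()' is .strip()
def normalizeSysId (s : String) : String := PySem.Str.strip s

-- _sys_id_prefix3 (shared helper of both Pythons)
def sysIdPrefix3 (s : String) : String :=
  let value := normalizeSysId s
  if value = "" then ""
  else
    -- value.split("."): sep "." ≠ "", so split? is always 'some'
    let parts := (PySem.Str.split? value ".").getD []
    if parts.length < 3 then ""
    else PySem.Str.join "." (PySem.List.slice parts none (some 3))

-- _build_prefix3_zkp_mapping: the dict argument is the assoc list collapsed as dict(...) does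
-- (Dict.ofList); the final loop pops each conflict from prefix_map ('pop(prefix, None)' = erase);
-- the resulting dict does not depend on the set's iteration order (erases commute).
def build_prefix3_zkp_mapping_py (mapping : List (String × String)) : List (String × String) :=
  let items := (PySem.Dict.ofList mapping).items
  let st := items.foldl
    (fun (st : PySem.Dict String String × PySem.Set String) item =>
      let pfx := sysIdPrefix3 item.1
      if pfx = "" then st
      else
        match st.1.get? pfx with
        | none => (st.1.insert pfx item.2, st.2)
        | some existing =>
            if existing ≠ item.2 then (st.1, PySem.Set.add st.2 pfx) else st)
    (PySem.Dict.empty, PySem.Set.empty)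
  (st.2.foldl (fun pm pfx => pm.erase pfx) st.1).items

-- ===== PORT B =====
-- Source B: the comprehension building 'pairs', then the scan; 'all(z == zkp for p, z in pairs
-- if p == prefix)' is pairs.all (fun q => !(q.1 == prefix) || (q.2 == zkp)).
def build_prefix3_zkp_mapping_py_alt (mapping : List (String × String)) : List (String × String) :=
  let pairs := (PySem.Dict.ofList mapping).items.map (fun kv => (sysIdPrefix3 kv.1, kv.2))
  (pairs.foldl
    (fun (res : PySem.Dict String String) pz =>
      if pz.1 = "" ∨ res.contains pz.1 then res
      else if pairs.all (fun q => !(q.1 == pz.1) || (q.2 == pz.2)) then res.insert pz.1 pz.2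
      else res)
    PySem.Dict.empty).items

-- ===== PRECONDITION & SPEC =====
def Spec_build_prefix3_zkp_mapping_py (mapping : List (String × String)) (out : List (String × String)) : Prop := out = build_prefix3_zkp_mapping_py_alt mapping
instance (mapping : List (String × String)) (out : List (String × String)) : Decidable (Spec_build_prefix3_zkp_mapping_py mapping out) := by unfold Spec_build_prefix3_zkp_mapping_py; infer_instance

-- ===== CLAIM (what is proved, stated in full; the proofs are below) =====
def Claim_equal_build_prefix3_zkp_mapping_py : Prop := ∀ (mapping : List (String × String)), Dom_build_prefix3_zkp_mapping_py mapping → Spec_build_prefix3_zkp_mapping_py mapping (build_prefix3_zkp_mapping_py mapping)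

-- ===== LEMMAS AND PROOFS =====

-- A's loop body on a precomputed (prefix, zkp) pair
def stepA2 (st : PySem.Dict String String × PySem.Set String) (pz : String × String) :
    PySem.Dict String String × PySem.Set String :=
  if pz.1 = "" then st
  else
    match st.1.get? pz.1 with
    | none => (st.1.insert pz.1 pz.2, st.2)
    | some existing =>
        if existing ≠ pz.2 then (st.1, PySem.Set.add st.2 pz.1) else st

-- B's loop body (the whole pairs list P is consulted inside)
def stepB (P : List (String × String)) (res : PySem.Dict String String)
    (pz : String × String) : PySem.Dict String String :=
  if pz.1 = "" ∨ res.contains pz.1 then res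
  else if P.all (fun q => !(q.1 == pz.1) || (q.2 == pz.2)) then res.insert pz.1 pz.2
  else res

-- first zkp recorded for a prefix in the processed part of the list
def firstVal (L : List (String × String)) (p : String) : Option String :=
  (L.find? (fun q => q.1 == p)).map Prod.snd

-- invariant tying A's (prefix_map, conflicts) after processing L1 to B's result dict
def InvAB (P L1 : List (String × String)) (pm : PySem.Dict String String)
    (cf : PySem.Set String) (res : PySem.Dict String String) : Prop :=
  pm.keys.Nodup ∧
  res.items = pm.items.filter (fun kv => P.all (fun q => !(q.1 == kv.1) || (q.2 == kv.2))) ∧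
  (∀ p z, pm.get? p = some z ↔ (p ≠ "" ∧ firstVal L1 p = some z)) ∧
  (∀ p, p ≠ "" → (p ∈ cf ↔ ∃ z, firstVal L1 p = some z ∧ ∃ q ∈ L1, q.1 = p ∧ q.2 ≠ z)) ∧
  ("" : String) ∉ cf

lemma firstVal_append_singleton (L : List (String × String)) (pz : String × String)
    (p : String) :
    firstVal (L ++ [pz]) p =
      ((firstVal L p).or (if pz.1 = p then some pz.2 else none)) := by
  unfold firstVal
  rw [List.find?_append]
  cases h : L.find? (fun q => q.1 == p) with
  | some q => simp
  | none =>
    simp only [Option.map_none, Option.none_or]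
    by_cases hp : pz.1 = p
    · simp [List.find?, hp]
    · have hb : (pz.1 == p) = false := beq_false_of_ne hp
      simp [List.find?, hb]
      exact hp

lemma firstVal_none_iff (L : List (String × String)) (p : String) :
    firstVal L p = none ↔ ∀ q ∈ L, q.1 ≠ p := by
  unfold firstVal
  rw [Option.map_eq_none_iff, List.find?_eq_none]
  simp

lemma firstVal_some_mem {L : List (String × String)} {p z : String}
    (h : firstVal L p = some z) : (p, z) ∈ L := by
  unfold firstVal at h
  rw [Option.map_eq_some_iff] at h
  obtain ⟨q, hq, hz⟩ := h
  have hm := List.mem_of_find?_eq_some hq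
  have hp := List.find?_some hq
  have : q.1 = p := by simpa using hp
  cases q
  simp_all

lemma mem_keys_iff_get?_filter {pm res : PySem.Dict String String}
    {g : String × String → Bool} (hres : res.items = pm.items.filter g)
    (hnd : pm.keys.Nodup) (p : String) :
    p ∈ res.keys ↔ ∃ v, pm.get? p = some v ∧ g (p, v) = true := by
  constructor
  · intro hmem
    simp only [PySem.Dict.keys, hres, List.mem_map] at hmem
    obtain ⟨kv, hkv, hk⟩ := hmem
    rw [List.mem_filter] at hkv
    refine ⟨kv.2, ?_, ?_⟩
    · have : (p, kv.2) ∈ pm.items := by cases kv; simp_all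
      exact PySem.Dict.get?_of_mem_items pm this hnd
    · cases kv; simp_all
  · rintro ⟨v, hv, hg⟩
    have : (p, v) ∈ pm.items := PySem.Dict.mem_items_of_get?_eq_some pm hv
    simp only [PySem.Dict.keys, hres, List.mem_map]
    exact ⟨(p, v), List.mem_filter.mpr ⟨this, hg⟩, rfl⟩

lemma stepAB (P L1 : List (String × String)) (pz : String × String)
    (pm : PySem.Dict String String) (cf : PySem.Set String) (res : PySem.Dict String String)
    (hL1 : ∀ q ∈ L1, q ∈ P)
    (h : InvAB P L1 pm cf res) :
    InvAB P (L1 ++ [pz]) (stepA2 (pm, cf) pz).1 (stepA2 (pm, cf) pz).2 (stepB P res pz) := by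
  obtain ⟨hnd, hfil, hget, hcf, hcfe⟩ := h
  by_cases hp0 : pz.1 = ""
  · -- empty prefix: both loops skip; firstVal at any p ≠ "" is unchanged
    have hA : stepA2 (pm, cf) pz = (pm, cf) := by simp [stepA2, hp0]
    have hB : stepB P res pz = res := by simp [stepB, hp0]
    rw [hA, hB]
    refine ⟨hnd, hfil, ?_, ?_, hcfe⟩
    · intro p z
      rw [hget p z, firstVal_append_singleton]
      constructor
      · rintro ⟨hpne, hv⟩
        refine ⟨hpne, ?_⟩
        rw [hv]; rfl
      · rintro ⟨hpne, hv⟩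
        refine ⟨hpne, ?_⟩
        rw [if_neg (show ¬ pz.1 = p by rw [hp0]; exact fun he => hpne he.symm),
          Option.or_none] at hv
        exact hv
    · intro p hpne
      rw [hcf p hpne, firstVal_append_singleton,
        if_neg (show ¬ pz.1 = p by rw [hp0]; exact fun he => hpne he.symm), Option.or_none]
      constructor
      · rintro ⟨z, hz, q, hq, h1, h2⟩
        exact ⟨z, hz, q, List.mem_append_left _ hq, h1, h2⟩
      · rintro ⟨z, hz, q, hq, h1, h2⟩
        rcases List.mem_append.mp hq with hq | hq
        · exact ⟨z, hz, q, hq, h1, h2⟩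
        · have hqe : q = pz := by simpa using hq
          exact absurd (show p = "" by rw [← h1, hqe]; exact hp0) hpne
  · cases hgp : pm.get? pz.1 with
    | none =>
      -- first occurrence of this prefix
      have hfv : firstVal L1 pz.1 = none := by
        cases hfv : firstVal L1 pz.1 with
        | none => rfl
        | some w => exact absurd ((hget pz.1 w).mpr ⟨hp0, hfv⟩) (by rw [hgp]; simp)
      have hnomem : ∀ q ∈ L1, q.1 ≠ pz.1 := (firstVal_none_iff L1 pz.1).mp hfv
      have hpmnc : pm.contains pz.1 = false :=
        (PySem.Dict.get?_eq_none_iff_contains pm pz.1).mp hgp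
      have hresnc : res.contains pz.1 = false := by
        rw [PySem.Dict.contains_eq_decide_mem_keys, decide_eq_false_iff_not]
        intro hmem
        obtain ⟨v, hv, _⟩ := (mem_keys_iff_get?_filter hfil hnd pz.1).mp hmem
        rw [hgp] at hv; simp at hv
      have hA : stepA2 (pm, cf) pz = (pm.insert pz.1 pz.2, cf) := by
        simp [stepA2, hp0, hgp]
      have hfv' : firstVal (L1 ++ [pz]) pz.1 = some pz.2 := by
        rw [firstVal_append_singleton, hfv, if_pos rfl]; rfl
      have hfv'ne : ∀ p, p ≠ pz.1 → firstVal (L1 ++ [pz]) p = firstVal L1 p := by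
        intro p hne
        rw [firstVal_append_singleton, if_neg (fun he => hne he.symm), Option.or_none]
      have hnd' : (pm.insert pz.1 pz.2).keys.Nodup := by
        rw [PySem.Dict.keys_insert_of_not_contains pm pz.2 hpmnc]
        refine List.nodup_append.mpr ⟨hnd, List.nodup_singleton _, ?_⟩
        intro a ha b hb hab
        have hb1 : b = pz.1 := by simpa using hb
        rw [hab, hb1] at ha
        exact absurd ((PySem.Dict.contains_iff_mem_keys pm pz.1).mpr ha) (by simp [hpmnc])
      have hget' : ∀ p z, (pm.insert pz.1 pz.2).get? p = some z ↔
          (p ≠ "" ∧ firstVal (L1 ++ [pz]) p = some z) := by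
        intro p z
        rw [PySem.Dict.get?_insert]
        by_cases hpp : p = pz.1
        · subst hpp
          rw [if_pos rfl, hfv']
          constructor
          · intro hz; exact ⟨hp0, by rw [← Option.some_inj.mp hz]⟩
          · rintro ⟨_, hz⟩; rw [Option.some_inj.mp hz]
        · rw [if_neg hpp, hget p z, hfv'ne p hpp]
      have hcf' : ∀ p, p ≠ "" → (p ∈ cf ↔
          ∃ z, firstVal (L1 ++ [pz]) p = some z ∧ ∃ q ∈ L1 ++ [pz], q.1 = p ∧ q.2 ≠ z) := by
        intro p hpne
        by_cases hpp : p = pz.1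
        · subst hpp
          constructor
          · intro hmem
            obtain ⟨z, hz, _⟩ := (hcf _ hpne).mp hmem
            rw [hfv] at hz; simp at hz
          · rintro ⟨z, hz, q, hq, h1, h2⟩
            rw [hfv'] at hz
            rcases List.mem_append.mp hq with hq | hq
            · exact absurd h1 (hnomem q hq)
            · have hqe : q = pz := by simpa using hq
              exact absurd (show q.2 = z by rw [hqe, ← Option.some_inj.mp hz]) h2
        · rw [hcf p hpne, hfv'ne p hpp]
          constructor
          · rintro ⟨z, hz, q, hq, h1, h2⟩
            exact ⟨z, hz, q, List.mem_append_left _ hq, h1, h2⟩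
          · rintro ⟨z, hz, q, hq, h1, h2⟩
            rcases List.mem_append.mp hq with hq | hq
            · exact ⟨z, hz, q, hq, h1, h2⟩
            · have hqe : q = pz := by simpa using hq
              exact absurd (show p = pz.1 by rw [← h1, hqe]) hpp
      have hitems' : (pm.insert pz.1 pz.2).items = pm.items ++ [(pz.1, pz.2)] :=
        PySem.Dict.items_insert_of_not_contains pm pz.2 hpmnc
      by_cases hG : P.all (fun q => !(q.1 == pz.1) || (q.2 == pz.2))
      · have hB : stepB P res pz = res.insert pz.1 pz.2 := by
          simp [stepB, hp0, hresnc, hG]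
        rw [hA, hB]
        refine ⟨hnd', ?_, hget', hcf', hcfe⟩
        rw [PySem.Dict.items_insert_of_not_contains res pz.2 hresnc, hitems',
          List.filter_append, hfil]
        simp [hG]
      · have hB : stepB P res pz = res := by
          simp only [stepB, hp0, hresnc, false_or, Bool.false_eq_true, if_false]
          rw [if_neg hG]
        rw [hA, hB]
        refine ⟨hnd', ?_, hget', hcf', hcfe⟩
        rw [hitems', List.filter_append, hfil]
        simp [hG]
    | some e =>
      -- prefix already seen: pm and res are unchanged; only cf may grow
      have hfv : firstVal L1 pz.1 = some e := ((hget pz.1 e).mp hgp).2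
      have hfv'all : ∀ p, firstVal (L1 ++ [pz]) p = firstVal L1 p := by
        intro p
        by_cases hpp : p = pz.1
        · subst hpp; rw [firstVal_append_singleton, hfv]; rfl
        · rw [firstVal_append_singleton, if_neg (fun he => hpp he.symm), Option.or_none]
      have hpeP : (pz.1, e) ∈ P := hL1 _ (firstVal_some_mem hfv)
      have hresc : res.contains pz.1 =
          P.all (fun q => !(q.1 == pz.1) || (q.2 == e)) := by
        by_cases hGe : P.all (fun q => !(q.1 == pz.1) || (q.2 == e))
        · rw [hGe, PySem.Dict.contains_eq_decide_mem_keys, decide_eq_true_iff]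
          exact (mem_keys_iff_get?_filter hfil hnd pz.1).mpr ⟨e, hgp, hGe⟩
        · rw [eq_false_of_ne_true hGe, PySem.Dict.contains_eq_decide_mem_keys,
            decide_eq_false_iff_not]
          intro hmem
          obtain ⟨v, hv, hg⟩ := (mem_keys_iff_get?_filter hfil hnd pz.1).mp hmem
          rw [hgp] at hv
          exact hGe (Option.some_inj.mp hv ▸ hg)
      have hB : stepB P res pz = res := by
        by_cases hGe : P.all (fun q => !(q.1 == pz.1) || (q.2 == e))
        · simp [stepB, hresc, hGe]
        · -- res does not contain the prefix, but the global check fails too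
          have hGz : ¬ (P.all (fun q => !(q.1 == pz.1) || (q.2 == pz.2)) = true) := by
            intro hGz
            by_cases hez : e = pz.2
            · exact hGe (hez ▸ hGz)
            · have := List.all_eq_true.mp hGz _ hpeP
              simp at this
              exact hez this
          simp only [stepB, hresc, eq_false_of_ne_true hGe, hp0, or_false,
            Bool.false_eq_true, if_false]
          rw [if_neg hGz]
      rw [hB]
      by_cases hez : e ≠ pz.2
      · have hA : stepA2 (pm, cf) pz = (pm, PySem.Set.add cf pz.1) := by
          simp [stepA2, hp0, hgp, hez]
        rw [hA]
        refine ⟨hnd, hfil, ?_, ?_, ?_⟩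
        · intro p z; rw [hget p z, hfv'all p]
        · intro p hpne
          rw [hfv'all p]
          by_cases hpp : p = pz.1
          · subst hpp
            constructor
            · intro _
              exact ⟨e, hfv, pz, List.mem_append_right _ (by simp), rfl, fun he => hez he.symm⟩
            · intro _
              exact (PySem.Set.mem_add cf pz.1 pz.1).mpr (Or.inr rfl)
          · rw [PySem.Set.mem_add]
            constructor
            · rintro (hm | hm)
              · obtain ⟨z, hz, q, hq, h1, h2⟩ := (hcf p hpne).mp hm
                exact ⟨z, hz, q, List.mem_append_left _ hq, h1, h2⟩
              · exact absurd hm hpp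
            · rintro ⟨z, hz, q, hq, h1, h2⟩
              rcases List.mem_append.mp hq with hq | hq
              · exact Or.inl ((hcf p hpne).mpr ⟨z, hz, q, hq, h1, h2⟩)
              · have hqe : q = pz := by simpa using hq
                exact absurd (by rw [← h1, hqe] : p = pz.1) hpp
        · intro hm
          rcases (PySem.Set.mem_add cf pz.1 "").mp hm with hm | hm
          · exact hcfe hm
          · exact hp0 hm.symm
      · rw [not_not] at hez
        have hA : stepA2 (pm, cf) pz = (pm, cf) := by
          simp [stepA2, hp0, hgp, hez]
        rw [hA]
        refine ⟨hnd, hfil, ?_, ?_, hcfe⟩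
        · intro p z; rw [hget p z, hfv'all p]
        · intro p hpne
          rw [hcf p hpne, hfv'all p]
          constructor
          · rintro ⟨z, hz, q, hq, h1, h2⟩
            exact ⟨z, hz, q, List.mem_append_left _ hq, h1, h2⟩
          · rintro ⟨z, hz, q, hq, h1, h2⟩
            rcases List.mem_append.mp hq with hq | hq
            · exact ⟨z, hz, q, hq, h1, h2⟩
            · have hqe : q = pz := by simpa using hq
              by_cases hpp : p = pz.1
              · subst hpp
                rw [hfv] at hz
                exact absurd (show q.2 = z by rw [hqe, ← hez]; exact Option.some_inj.mp hz) h2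
              · exact absurd (by rw [← h1, hqe] : p = pz.1) hpp

lemma foldAB (P : List (String × String)) :
    ∀ (L2 L1 : List (String × String)) (pm : PySem.Dict String String)
      (cf : PySem.Set String) (res : PySem.Dict String String),
      (∀ q ∈ L1 ++ L2, q ∈ P) → InvAB P L1 pm cf res →
      InvAB P (L1 ++ L2) ((L2.foldl stepA2 (pm, cf)).1) ((L2.foldl stepA2 (pm, cf)).2)
        (L2.foldl (stepB P) res) := by
  intro L2
  induction L2 with
  | nil => intro L1 pm cf res _ h; simpa using h
  | cons pz rest ih =>
    intro L1 pm cf res hsub h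
    have hL1 : ∀ q ∈ L1, q ∈ P := fun q hq => hsub q (List.mem_append_left _ hq)
    have h' := stepAB P L1 pz pm cf res hL1 h
    have hsub' : ∀ q ∈ (L1 ++ [pz]) ++ rest, q ∈ P := by
      intro q hq
      apply hsub
      simpa using (by simpa [List.append_assoc] using hq)
    have := ih (L1 ++ [pz]) (stepA2 (pm, cf) pz).1 (stepA2 (pm, cf) pz).2
      (stepB P res pz) hsub' h'
    simpa [List.append_assoc] using this

lemma erase_fold_items (cs : List String) :
    ∀ (d : PySem.Dict String String),
      (cs.foldl (fun pm pfx => pm.erase pfx) d).items =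
        d.items.filter (fun p => decide (p.1 ∉ cs)) := by
  induction cs with
  | nil => intro d; simp
  | cons c rest ih =>
    intro d
    rw [List.foldl_cons, ih]
    have : (d.erase c).items = d.items.filter (fun p => !(p.1 == c)) := by
      simp [PySem.Dict.erase]
    rw [this, List.filter_filter]
    apply List.filter_congr
    intro p _
    by_cases hc : p.1 = c <;> by_cases hr : p.1 ∈ rest <;> simp [hc, hr]

-- A's loop body on the raw item (defeq to the port's lambda; the prefix is computed inside)
def stepA1 (st : PySem.Dict String String × PySem.Set String) (item : String × String) :
    PySem.Dict String String × PySem.Set String :=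
  stepA2 st (sysIdPrefix3 item.1, item.2)

-- ===== VERDICT (by name: the statement is the Claim_ definition above) =====
theorem build_prefix3_zkp_mapping_py_spec : Claim_equal_build_prefix3_zkp_mapping_py := by
  intro mapping _
  unfold Spec_build_prefix3_zkp_mapping_py
  show ((((PySem.Dict.ofList mapping).items.foldl stepA1
        (PySem.Dict.empty, PySem.Set.empty)).2).foldl (fun pm pfx => pm.erase pfx)
        (((PySem.Dict.ofList mapping).items.foldl stepA1
        (PySem.Dict.empty, PySem.Set.empty)).1)).items =
    ((((PySem.Dict.ofList mapping).items.map (fun kv => (sysIdPrefix3 kv.1, kv.2))).foldl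
        (stepB ((PySem.Dict.ofList mapping).items.map (fun kv => (sysIdPrefix3 kv.1, kv.2))))
        PySem.Dict.empty)).items
  set items := (PySem.Dict.ofList mapping).items with hitems
  set P := items.map (fun kv => (sysIdPrefix3 kv.1, kv.2)) with hP
  have hfoldA : items.foldl stepA1 (PySem.Dict.empty, PySem.Set.empty) =
      P.foldl stepA2 (PySem.Dict.empty, PySem.Set.empty) := by
    rw [hP, List.foldl_map]
    rfl
  rw [hfoldA]
  have hinv0 : InvAB P [] PySem.Dict.empty PySem.Set.empty PySem.Dict.empty := by
    refine ⟨?_, rfl, ?_, ?_, ?_⟩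
    · simp [PySem.Dict.empty, PySem.Dict.keys]
    · intro p z
      simp [PySem.Dict.get?_empty, firstVal]
    · intro p _
      simp [PySem.Set.empty, firstVal, List.find?]
    · simp [PySem.Set.empty]
  have hinv := foldAB P P [] PySem.Dict.empty PySem.Set.empty PySem.Dict.empty
    (by intro q hq; simpa using hq) hinv0
  rw [List.nil_append] at hinv
  obtain ⟨hnd, hfil, hget, hcf, _⟩ := hinv
  rw [erase_fold_items, hfil]
  apply List.filter_congr
  intro kv hkv
  have hgkv : (P.foldl stepA2 (PySem.Dict.empty, PySem.Set.empty)).1.get? kv.1 = some kv.2 :=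
    PySem.Dict.get?_of_mem_items _ (by cases kv; exact hkv) hnd
  obtain ⟨hkne, hfv⟩ := (hget kv.1 kv.2).mp hgkv
  have hiff : kv.1 ∉ (P.foldl stepA2 (PySem.Dict.empty, PySem.Set.empty)).2 ↔
      ∀ q ∈ P, q.1 = kv.1 → q.2 = kv.2 := by
    rw [hcf kv.1 hkne]
    constructor
    · intro hnc q hq h1
      by_contra h2
      exact hnc ⟨kv.2, hfv, q, hq, h1, h2⟩
    · rintro hall ⟨z, hz, q, hq, h1, h2⟩
      rw [hfv] at hz
      exact h2 ((Option.some_inj.mp hz) ▸ hall q hq h1)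
  rw [Bool.eq_iff_iff, decide_eq_true_eq, hiff]
  simp only [List.all_eq_true, Bool.or_eq_true, Bool.not_eq_eq_eq_not, Bool.not_true,
    beq_eq_false_iff_ne, ne_eq, beq_iff_eq, Prod.forall]
  constructor
  · intro h a b hm
    by_cases hab : a = kv.1
    · exact Or.inr (h a b hm hab)
    · exact Or.inl hab
  · intro h a b hm hab
    rcases h a b hm with h1 | h1
    · exact absurd hab h1
    · exact h1
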